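-- pv_equiv track=rewrite | github.com/AdamZhouSE/pythonHomework | Code/CodeRecords/2361/58822/281931.py | quanpai
-- ===== SOURCE A (Python) =====
-- def quanpai(a,times):
--     if(times==0):
--         return [a]
--     res=[]
--     res.append(a)
--     for i in range(0,len(a)):
--         for r in range(0,len(a)):
--             li=a.copy()
--             if(i!=r):
--                 li[i]=a[r]
--                 li[r]=a[i]
--             res.append(li)
--             res.extend(quanpai(li,(times-1)))
--         if(times==0):
--             break
--     res.sort()
--     re=[]
--     for i in range(0,len(res)):
--         if len(re)==0:
--             re.append(res[0])
--         else:
--             if(res[i-1]==res[i]):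
--                 continue
--             else:
--                 re.append(res[i])
--     return re
-- ===== SOURCE B (Python) =====
-- def quanpai(a, times):
--     # BFS over permutation states with a visited set, up to depth `times`
--     # (early exit once no new state appears), then one final sort.
--     start = tuple(a)
--     visited = {start}
--     frontier = [start]
--     for _ in range(times):
--         nxt = []
--         for p in frontier:
--             for i in range(len(p)):
--                 for r in range(i + 1, len(p)):
--                     q = list(p)
--                     q[i], q[r] = q[r], q[i]
--                     q = tuple(q)
--                     if q not in visited:
--                         visited.add(q)
--                         nxt.append(q)
--         if not nxt:
--             break
--         frontier = nxt
--     return sorted(list(x) for x in visited)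
-- ===== Notes on version B (the rewrite author's own statement) =====
-- stated objective: alternative
-- what changed: Replaced A's redundant recursion (which re-enumerates, re-sorts and re-dedups every subtree, visiting each permutation many times) by a breadth-first search over permutation states with a visited set up to depth `times`, with early exit once no new permutation appears, followed by a single final sort; intended as faster (it visits each reachable permutation once), but a timing run could not confirm this because on its large inputs the reachable set itself is factorial and neither side finishes.
import Mathlib
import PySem

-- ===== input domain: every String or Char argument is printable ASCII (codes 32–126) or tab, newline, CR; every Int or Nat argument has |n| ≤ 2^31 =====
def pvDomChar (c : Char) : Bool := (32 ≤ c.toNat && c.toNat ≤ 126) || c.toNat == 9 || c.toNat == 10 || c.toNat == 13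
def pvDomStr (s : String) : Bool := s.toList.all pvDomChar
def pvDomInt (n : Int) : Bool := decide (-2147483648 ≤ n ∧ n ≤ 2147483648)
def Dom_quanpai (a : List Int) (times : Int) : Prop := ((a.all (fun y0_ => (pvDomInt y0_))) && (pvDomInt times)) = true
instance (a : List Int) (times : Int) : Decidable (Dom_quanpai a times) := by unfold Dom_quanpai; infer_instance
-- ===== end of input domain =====

-- B replaces A's redundant recursion (which re-enumerates and re-sorts every subtree)
-- by a BFS over permutation states with a visited set up to depth `times` (objective: alternative).


-- ===== PORT A =====
-- li = a.copy(); if i != r: li[i] = a[r]; li[r] = a[i]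
def pvSwapA (a : List Int) (i r : Nat) : List Int :=
  if i ≠ r then (a.set i (a.getD r 0)).set r (a.getD i 0) else a

-- A's final dedup loop: for i in range(len(res)): append res[0] when re empty,
-- else skip when res[i-1]==res[i], else append res[i]
def pvDedupA (res : List (List Int)) : List (List Int) :=
  (List.range res.length).foldl
    (fun re i =>
      if re.length = 0 then re ++ [res.getD 0 []]
      else if res.getD (i - 1) [] = res.getD i [] then re
      else re ++ [res.getD i []]) []

-- A's recursion, with the nonnegative `times` as structural fuel (Python recurses on times-1)
def quanpaiAux : Nat → List Int → List (List Int)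
  | 0, a => [a]
  | t + 1, a =>
    let res := (List.range a.length).foldl (fun res i =>
      (List.range a.length).foldl (fun res r =>
        (res ++ [pvSwapA a i r]) ++ quanpaiAux t (pvSwapA a i r)) res) [a]
    pvDedupA (PySem.List.sorted res (fun x => x) false)

def quanpai (a : List Int) (times : Int) : List (List Int) :=
  if times = 0 then [a]
  else if times < 0 then
    -- empty a: the loops never run and A returns [a]; nonempty a: Python recurses
    -- without bound (RecursionError) — those inputs are outside Pre_, [] is an arbitrary total value
    (if a.length = 0 then [a] else [])
  else quanpaiAux times.toNat a

-- ===== PORT B =====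
def pvSwapB (p : List Int) (i r : Nat) : List Int :=
  (p.set i (p.getD r 0)).set r (p.getD i 0)

-- one frontier element p: for i in range(len(p)): for r in range(i+1, len(p)):
--   q = swap; if q not in visited: visited.add(q); nxt.append(q)
def pvStepP (acc : PySem.Set (List Int) × List (List Int)) (p : List Int) :
    PySem.Set (List Int) × List (List Int) :=
  (List.range p.length).foldl (fun acc i =>
    (List.range' (i + 1) (p.length - (i + 1))).foldl (fun acc r =>
      let q := pvSwapB p i r
      if q ∈ acc.1 then acc else (PySem.Set.add acc.1 q, acc.2 ++ [q])) acc) acc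

-- for _ in range(times): … ; if not nxt: break; frontier = nxt
def pvLoop : Nat → PySem.Set (List Int) → List (List Int) → PySem.Set (List Int)
  | 0, visited, _ => visited
  | k + 1, visited, frontier =>
    let acc := frontier.foldl pvStepP (visited, [])
    if acc.2.isEmpty then acc.1 else pvLoop k acc.1 acc.2

def quanpai_alt (a : List Int) (times : Int) : List (List Int) :=
  PySem.List.sorted (pvLoop times.toNat [a] [a]) (fun x => x) false

-- ===== PRECONDITION & SPEC =====
-- Pre_ excludes negative `times` with nonempty `a`, on which Python A recurses without bound (RecursionError)
def Pre_quanpai (a : List Int) (times : Int) : Prop := 0 ≤ times ∨ a = []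
instance (a : List Int) (times : Int) : Decidable (Pre_quanpai a times) := by unfold Pre_quanpai; infer_instance
def pvWitness_quanpai : List Int × Int := ([1, 2], 1)

def Spec_quanpai (a : List Int) (times : Int) (out : List (List Int)) : Prop := out = quanpai_alt a times
instance (a : List Int) (times : Int) (out : List (List Int)) : Decidable (Spec_quanpai a times out) := by unfold Spec_quanpai; infer_instance

-- ===== CLAIM (what is proved, stated in full; the proofs are below) =====
def Claim_equal_quanpai : Prop := ∀ (a : List Int) (times : Int), Dom_quanpai a times → Pre_quanpai a times → Spec_quanpai a times (quanpai a times)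

-- ===== LEMMAS AND PROOFS =====

-- A's one-swap step (i = r allowed, order of i, r free)
def PStep (y x : List Int) : Prop := ∃ i r : Nat, i < y.length ∧ r < y.length ∧ x = pvSwapA y i r
-- B's one-swap step (i < r)
def PStepB (p x : List Int) : Prop := ∃ i r : Nat, i < r ∧ r < p.length ∧ x = pvSwapB p i r

-- states reachable from a within t swaps
def ReachLe : Nat → List Int → List Int → Prop
  | 0, a, x => x = a
  | t + 1, a, x => ReachLe t a x ∨ ∃ y, ReachLe t a y ∧ PStep y x

theorem pstep_cases {y x : List Int} (h : PStep y x) : x = y ∨ PStepB y x := by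
  obtain ⟨i, r, hi, hr, hx⟩ := h
  rcases lt_trichotomy i r with hlt | heq | hgt
  · right
    exact ⟨i, r, hlt, hr, by simpa [pvSwapA, pvSwapB, Nat.ne_of_lt hlt] using hx⟩
  · left; simpa [pvSwapA, heq] using hx
  · right
    refine ⟨r, i, hgt, hi, ?_⟩
    rw [hx]
    simp only [pvSwapA, pvSwapB, ne_eq]
    rw [if_pos (by omega)]
    exact List.set_comm _ _ (by omega)

theorem pstepB_pstep {p x : List Int} (h : PStepB p x) : PStep p x := by
  obtain ⟨i, r, hir, hr, hx⟩ := h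
  exact ⟨i, r, by omega, hr, by simpa [pvSwapA, pvSwapB, Nat.ne_of_lt hir] using hx⟩

theorem reachLe_refl (t : Nat) (a : List Int) : ReachLe t a a := by
  induction t with
  | zero => rfl
  | succ t ih => exact Or.inl ih

theorem reachLe_mono {t t' : Nat} (h : t ≤ t') {a x : List Int} (hr : ReachLe t a x) : ReachLe t' a x := by
  induction t' with
  | zero => simpa [Nat.le_zero.mp h] using hr
  | succ t' ih =>
    rcases Nat.lt_or_ge t (t' + 1) with hlt | hge
    · exact Or.inl (ih (by omega))
    · simpa [show t = t' + 1 by omega] using hr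

theorem reachLe_cons {a y : List Int} (hs : PStep a y) :
    ∀ {t : Nat} {x : List Int}, ReachLe t y x → ReachLe (t + 1) a x := by
  intro t
  induction t with
  | zero =>
    intro x hx
    have hx' : x = y := hx
    exact Or.inr ⟨a, rfl, hx' ▸ hs⟩
  | succ t ih =>
    intro x hx
    rcases hx with hx | ⟨z, hz, hst⟩
    · exact Or.inl (ih hx)
    · exact Or.inr ⟨z, ih hz, hst⟩

theorem reachLe_first (t : Nat) (a x : List Int) :
    ReachLe (t + 1) a x ↔ x = a ∨ ∃ y, PStep a y ∧ ReachLe t y x := by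
  constructor
  · induction t generalizing x with
    | zero =>
      intro h
      rcases h with h | ⟨y, hy, hst⟩
      · exact Or.inl h
      · have hy' : y = a := hy
        exact Or.inr ⟨x, by rwa [hy'] at hst, rfl⟩
    | succ t ih =>
      intro h
      rcases h with h | ⟨y, hy, hst⟩
      · rcases ih _ h with h | ⟨y, hy, hr⟩
        · exact Or.inl h
        · exact Or.inr ⟨y, hy, reachLe_mono (by omega) hr⟩
      · rcases ih _ hy with h | ⟨z, hz, hr⟩
        · exact Or.inr ⟨x, by rwa [h] at hst, reachLe_refl _ _⟩
        · exact Or.inr ⟨z, hz, Or.inr ⟨y, hr, hst⟩⟩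
  · intro h
    rcases h with h | ⟨y, hy, hr⟩
    · rw [h]; exact reachLe_refl _ _
    · exact reachLe_cons hy hr

theorem reachLe_stable {a : List Int} {d : Nat}
    (h : ∀ x, ReachLe (d + 1) a x → ReachLe d a x) :
    ∀ m x, ReachLe (d + m) a x → ReachLe d a x := by
  intro m
  induction m with
  | zero => intro x hx; exact hx
  | succ m ih =>
    intro x hx
    rcases hx with hx | ⟨y, hy, hst⟩
    · exact ih x hx
    · exact h x (Or.inr ⟨y, ih y hy, hst⟩)

-- the strict-sorted enumeration of a set of states is unique
theorem strict_sorted_eq {l₁ l₂ : List (List Int)}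
    (h₁ : l₁.Pairwise (· < ·)) (h₂ : l₂.Pairwise (· < ·))
    (hm : ∀ x, x ∈ l₁ ↔ x ∈ l₂) : l₁ = l₂ := by
  have n₁ : l₁.Nodup := h₁.imp (fun h => ne_of_lt h)
  have n₂ : l₂.Nodup := h₂.imp (fun h => ne_of_lt h)
  exact List.eq_of_perm_of_sorted
    (fun a b _ _ hab hba => absurd hba (lt_asymm hab))
    (le := (· < ·)) h₁ h₂ ((List.perm_ext_iff_of_nodup n₁ n₂).mpr hm)

-- ---- A side ----

theorem pvDedupA_spec (s : List (List Int)) (hs : s.Pairwise (· ≤ ·)) (hne : s ≠ []) :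
    (pvDedupA s).Pairwise (· < ·) ∧ ∀ x, x ∈ pvDedupA s ↔ x ∈ s := by
  have hlen : 0 < s.length := List.length_pos_iff.mpr hne
  have hpe : ∀ i j (hi : i < s.length) (hj : j < s.length), i ≤ j → s[i] ≤ s[j] := by
    intro i j hi hj hij
    rcases Nat.lt_or_ge i j with h | h
    · exact List.pairwise_iff_getElem.mp hs i j hi hj h
    · have : i = j := by omega
      subst this; exact le_refl _
  have aux : ∀ k, 1 ≤ k → k ≤ s.length →
      ((List.range k).foldl (fun re i =>
        if re.length = 0 then re ++ [s.getD 0 []]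
        else if s.getD (i - 1) [] = s.getD i [] then re
        else re ++ [s.getD i []]) []).Pairwise (· < ·) ∧
      (∀ x, x ∈ (List.range k).foldl (fun re i =>
        if re.length = 0 then re ++ [s.getD 0 []]
        else if s.getD (i - 1) [] = s.getD i [] then re
        else re ++ [s.getD i []]) [] ↔ x ∈ s.take k) ∧
      ((List.range k).foldl (fun re i =>
        if re.length = 0 then re ++ [s.getD 0 []]
        else if s.getD (i - 1) [] = s.getD i [] then re
        else re ++ [s.getD i []]) []) ≠ [] := by
    intro k
    induction k with
    | zero => intro h; omega
    | succ k ih =>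
      intro _ hk1
      rw [List.range_succ, List.foldl_append]
      by_cases hk0 : k = 0
      · subst hk0
        simp only [List.range_zero, List.foldl_nil, List.foldl_cons, List.length_nil,
          if_pos rfl, List.nil_append]
        have hget : s.getD 0 [] = s[0] := List.getD_eq_getElem s [] hlen
        refine ⟨List.pairwise_singleton _ _, fun x => ?_, by simp⟩
        rw [List.take_succ]
        simp [hget, List.getElem?_eq_getElem hlen]
      · obtain ⟨ihpw, ihmem, ihne⟩ := ih (by omega) (by omega)
        set P := (List.range k).foldl (fun re i =>
          if re.length = 0 then re ++ [s.getD 0 []]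
          else if s.getD (i - 1) [] = s.getD i [] then re
          else re ++ [s.getD i []]) [] with hP
        have hk : k < s.length := by omega
        have hk1' : k - 1 < s.length := by omega
        have hgk : s.getD k [] = s[k] := List.getD_eq_getElem s [] hk
        have hgk1 : s.getD (k - 1) [] = s[k - 1] := List.getD_eq_getElem s [] hk1'
        have hlenP : ¬ P.length = 0 := fun h => ihne (List.length_eq_zero_iff.mp h)
        simp only [List.foldl_cons, List.foldl_nil, if_neg hlenP]
        have htake : s.take (k + 1) = s.take k ++ [s[k]] := by
          rw [List.take_succ, List.getElem?_eq_getElem hk]; rfl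
        have hmemtk : ∀ y, y ∈ s.take k → y ≤ s[k - 1] := by
          intro y hy
          obtain ⟨j, hj, hyj⟩ := List.mem_iff_getElem.mp hy
          have hjk : j < k := by
            have := hj; rw [List.length_take] at this; omega
          rw [List.getElem_take] at hyj
          rw [← hyj]
          exact hpe j (k - 1) (by omega) hk1' (by omega)
        by_cases heq : s.getD (k - 1) [] = s.getD k []
        · rw [if_pos heq]
          refine ⟨ihpw, fun x => ?_, ihne⟩
          rw [ihmem x, htake]
          simp only [List.mem_append, List.mem_singleton]
          constructor
          · exact Or.inl
          · rintro (h | rfl)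
            · exact h
            · rw [hgk1, hgk] at heq
              rw [← heq]
              have : (s.take k)[k - 1]'(by rw [List.length_take]; omega) = s[k - 1] :=
                List.getElem_take
              rw [← this]
              exact List.getElem_mem _
        · rw [if_neg heq]
          rw [hgk1, hgk] at heq
          have hlt : s[k - 1] < s[k] :=
            lt_of_le_of_ne (hpe (k - 1) k hk1' hk (by omega)) heq
          refine ⟨?_, fun x => ?_, by simp⟩
          · rw [List.pairwise_append]
            refine ⟨ihpw, List.pairwise_singleton _ _, ?_⟩
            intro y hy b hb
            rw [List.mem_singleton] at hb
            subst hb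
            rw [hgk]
            exact lt_of_le_of_lt (hmemtk y ((ihmem y).mp hy)) hlt
          · rw [htake]
            simp only [List.mem_append, List.mem_singleton, ihmem x, hgk]
  obtain ⟨hpw, hmem, -⟩ := aux s.length (by omega) (le_refl _)
  unfold pvDedupA
  exact ⟨hpw, fun x => by rw [hmem x, List.take_length]⟩

theorem quanpaiAux_spec (t : Nat) (a : List Int) :
    (quanpaiAux t a).Pairwise (· < ·) ∧ ∀ x, x ∈ quanpaiAux t a ↔ ReachLe t a x := by
  induction t generalizing a with
  | zero =>
    refine ⟨List.pairwise_singleton _ _, fun x => ?_⟩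
    show x ∈ [a] ↔ x = a
    simp
  | succ t ih =>
    rw [show quanpaiAux (t + 1) a = pvDedupA (PySem.List.sorted
        ((List.range a.length).foldl (fun res i =>
          (List.range a.length).foldl (fun res r =>
            (res ++ [pvSwapA a i r]) ++ quanpaiAux t (pvSwapA a i r)) res) [a])
        (fun x => x) false) from rfl]
    set R := (List.range a.length).foldl (fun res i =>
      (List.range a.length).foldl (fun res r =>
        (res ++ [pvSwapA a i r]) ++ quanpaiAux t (pvSwapA a i r)) res) [a] with hRdef
    have hinner : ∀ (i : Nat) (init : List (List Int)),
        (List.range a.length).foldl (fun res r =>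
          (res ++ [pvSwapA a i r]) ++ quanpaiAux t (pvSwapA a i r)) init =
        init ++ (List.range a.length).flatMap
          (fun r => pvSwapA a i r :: quanpaiAux t (pvSwapA a i r)) := by
      intro i init
      have hfn : (fun (res : List (List Int)) r =>
          (res ++ [pvSwapA a i r]) ++ quanpaiAux t (pvSwapA a i r)) =
          fun res r => res ++ (pvSwapA a i r :: quanpaiAux t (pvSwapA a i r)) := by
        funext res r; simp
      rw [hfn]
      exact PySem.List.foldl_append_eq_flatMap _ _ _
    have houter : R = [a] ++ (List.range a.length).flatMap (fun i =>
        (List.range a.length).flatMap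
          (fun r => pvSwapA a i r :: quanpaiAux t (pvSwapA a i r))) := by
      rw [hRdef]
      have hfn : (fun (res : List (List Int)) i =>
          (List.range a.length).foldl (fun res r =>
            (res ++ [pvSwapA a i r]) ++ quanpaiAux t (pvSwapA a i r)) res) =
          fun res i => res ++ (List.range a.length).flatMap
            (fun r => pvSwapA a i r :: quanpaiAux t (pvSwapA a i r)) := by
        funext res i; exact hinner i res
      rw [hfn]
      exact PySem.List.foldl_append_eq_flatMap _ _ _
    have hRne : R ≠ [] := by rw [houter]; simp
    have hreach : ∀ x, x ∈ R ↔ ReachLe (t + 1) a x := by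
      intro x
      rw [houter, reachLe_first]
      simp only [List.cons_append, List.nil_append, List.mem_cons, List.mem_flatMap,
        List.mem_range]
      constructor
      · rintro (rfl | ⟨i, hi, r, hr, hx⟩)
        · exact Or.inl rfl
        · refine Or.inr ⟨pvSwapA a i r, ⟨i, r, hi, hr, rfl⟩, ?_⟩
          rcases hx with rfl | hx
          · exact reachLe_refl _ _
          · exact ((ih _).2 x).mp hx
      · rintro (rfl | ⟨y, ⟨i, r, hi, hr, rfl⟩, hrx⟩)
        · exact Or.inl rfl
        · exact Or.inr ⟨i, hi, r, hr, Or.inr (((ih _).2 x).mpr hrx)⟩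
    have hsne : PySem.List.sorted R (fun x => x) false ≠ [] := by
      rw [ne_eq, PySem.List.sorted_eq_nil_iff]
      exact hRne
    have hspw : (PySem.List.sorted R (fun x => x) false).Pairwise (· ≤ ·) := by
      have h := PySem.List.sorted_pairwise (κ := List Int) R (fun x => x)
      convert h using 2
    obtain ⟨hpw, hmem⟩ := pvDedupA_spec _ hspw hsne
    exact ⟨hpw, fun x => by rw [hmem x, PySem.List.mem_sorted, hreach x]⟩

-- ---- B side ----

def pvAdd (acc : PySem.Set (List Int) × List (List Int)) (q : List Int) :
    PySem.Set (List Int) × List (List Int) :=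
  if q ∈ acc.1 then acc else (PySem.Set.add acc.1 q, acc.2 ++ [q])

def pvQs (p : List Int) : List (List Int) :=
  (List.range p.length).flatMap (fun i =>
    (List.range' (i + 1) (p.length - (i + 1))).map (fun r => pvSwapB p i r))

theorem mem_pvQs (p x : List Int) : x ∈ pvQs p ↔ PStepB p x := by
  unfold pvQs PStepB
  simp only [List.mem_flatMap, List.mem_map, List.mem_range, List.mem_range'_1]
  constructor
  · rintro ⟨i, hi, r, ⟨hr1, hr2⟩, hx⟩
    exact ⟨i, r, by omega, by omega, hx.symm⟩
  · rintro ⟨i, r, hir, hr, hx⟩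
    exact ⟨i, by omega, r, ⟨by omega, by omega⟩, hx.symm⟩

theorem pvStepP_eq (acc : PySem.Set (List Int) × List (List Int)) (p : List Int) :
    pvStepP acc p = (pvQs p).foldl pvAdd acc := by
  simp only [pvStepP, pvQs, List.foldl_flatMap, List.foldl_map, pvAdd]

theorem pvAdd_fold (Qs : List (List Int)) :
    ∀ (v0 v n : List (List Int)), v = v0 ++ n → v.Nodup →
      (Qs.foldl pvAdd (v, n)).1 = v0 ++ (Qs.foldl pvAdd (v, n)).2 ∧
      (Qs.foldl pvAdd (v, n)).1.Nodup ∧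
      (∀ x, x ∈ (Qs.foldl pvAdd (v, n)).1 ↔ x ∈ v ∨ x ∈ Qs) := by
  induction Qs with
  | nil => intro v0 v n hv hnd; exact ⟨hv, hnd, fun x => by simp⟩
  | cons q Qs ih =>
    intro v0 v n hv hnd
    by_cases hq : q ∈ v
    · have hstep : pvAdd (v, n) q = (v, n) := by simp [pvAdd, hq]
      simp only [List.foldl_cons, hstep]
      obtain ⟨h1, h2, h3⟩ := ih v0 v n hv hnd
      refine ⟨h1, h2, fun x => ?_⟩
      rw [h3 x]
      constructor
      · rintro (h | h)
        · exact Or.inl h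
        · exact Or.inr (List.mem_cons_of_mem _ h)
      · rintro (h | h)
        · exact Or.inl h
        · rcases List.mem_cons.mp h with rfl | h
          · exact Or.inl hq
          · exact Or.inr h
    · have hstep : pvAdd (v, n) q = (v ++ [q], n ++ [q]) := by
        simp [pvAdd, hq, PySem.Set.add, PySem.Set.contains]
      simp only [List.foldl_cons, hstep]
      obtain ⟨h1, h2, h3⟩ := ih v0 (v ++ [q]) (n ++ [q]) (by rw [hv, List.append_assoc])
        (by simp only [List.nodup_append, List.nodup_singleton]; exact ⟨hnd, trivial, fun a ha b hb hab => hq ((hab.trans (List.mem_singleton.mp hb)) ▸ ha)⟩)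
      refine ⟨h1, h2, fun x => ?_⟩
      rw [h3 x]
      simp only [List.mem_append, List.mem_singleton, List.mem_cons]
      tauto

theorem pvFront_fold (f : List (List Int)) :
    ∀ (v0 v n : List (List Int)), v = v0 ++ n → v.Nodup →
      (f.foldl pvStepP (v, n)).1 = v0 ++ (f.foldl pvStepP (v, n)).2 ∧
      (f.foldl pvStepP (v, n)).1.Nodup ∧
      (∀ x, x ∈ (f.foldl pvStepP (v, n)).1 ↔ x ∈ v ∨ ∃ p ∈ f, PStepB p x) := by
  induction f with
  | nil => intro v0 v n hv hnd; exact ⟨hv, hnd, fun x => by simp⟩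
  | cons p f ih =>
    intro v0 v n hv hnd
    simp only [List.foldl_cons, pvStepP_eq]
    obtain ⟨h1, h2, h3⟩ := pvAdd_fold (pvQs p) v0 v n hv hnd
    obtain ⟨g1, g2, g3⟩ := ih v0 ((pvQs p).foldl pvAdd (v, n)).1 ((pvQs p).foldl pvAdd (v, n)).2 h1 h2
    rw [Prod.mk.eta] at g1 g2 g3
    refine ⟨g1, g2, fun x => ?_⟩
    rw [g3 x, h3 x]
    simp only [List.mem_cons, mem_pvQs]
    constructor
    · rintro ((h | h) | ⟨p', hp', h⟩)
      · exact Or.inl h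
      · exact Or.inr ⟨p, Or.inl rfl, h⟩
      · exact Or.inr ⟨p', Or.inr hp', h⟩
    · rintro (h | ⟨p', hp' | hp', h⟩)
      · exact Or.inl (Or.inl h)
      · exact Or.inl (Or.inr (hp' ▸ h))
      · exact Or.inr ⟨p', hp', h⟩

def BfsInv (a : List Int) (d : Nat) (v f : List (List Int)) : Prop :=
  v.Nodup ∧ (∀ x, x ∈ v ↔ ReachLe d a x) ∧ (∀ p ∈ f, p ∈ v) ∧
    (∀ x, ReachLe (d + 1) a x → x ∈ v ∨ ∃ p ∈ f, PStepB p x)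

theorem pvLoop_spec (a : List Int) :
    ∀ (k d : Nat) (v f : List (List Int)), BfsInv a d v f →
      (pvLoop k v f).Nodup ∧ ∀ x, x ∈ pvLoop k v f ↔ ReachLe (d + k) a x := by
  intro k
  induction k with
  | zero =>
    rintro d v f ⟨hnd, hmem, -, -⟩
    exact ⟨hnd, fun x => by simpa using hmem x⟩
  | succ k ih =>
    intro d v f hinv
    obtain ⟨hnd, hmem, hfv, hnext⟩ := hinv
    simp only [pvLoop]
    set R := f.foldl pvStepP (v, []) with hR
    obtain ⟨h1, h2, h3⟩ := pvFront_fold f v v [] (by simp) hnd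
    rw [← hR] at h1 h2 h3
    have hv'mem : ∀ x, x ∈ R.1 ↔ ReachLe (d + 1) a x := by
      intro x
      rw [h3 x]
      constructor
      · rintro (h | ⟨p, hp, h⟩)
        · exact reachLe_mono (Nat.le_succ d) ((hmem x).mp h)
        · exact Or.inr ⟨p, (hmem p).mp (hfv p hp), pstepB_pstep h⟩
      · exact hnext x
    by_cases hemp : R.2.isEmpty
    · rw [if_pos hemp]
      have hR2 : R.2 = [] := List.isEmpty_iff.mp hemp
      have hveq : R.1 = v := by rw [h1, hR2, List.append_nil]
      have hclosed : ∀ x, ReachLe (d + 1) a x → ReachLe d a x := by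
        intro x hx
        have hx1 := (hv'mem x).mpr hx
        rw [hveq] at hx1
        exact (hmem x).mp hx1
      refine ⟨by rwa [hveq], fun x => ?_⟩
      rw [hveq]
      constructor
      · intro h; exact reachLe_mono (by omega) ((hmem x).mp h)
      · intro h
        exact (hmem x).mpr (reachLe_stable hclosed (k + 1) x h)
    · rw [if_neg hemp]
      have hinv' : BfsInv a (d + 1) R.1 R.2 := by
        refine ⟨h2, hv'mem, ?_, ?_⟩
        · intro p hp; rw [h1]; exact List.mem_append_right _ hp
        · intro x hx
          by_cases hxv : x ∈ R.1
          · exact Or.inl hxv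
          · rcases hx with hx | ⟨y, hy, hst⟩
            · exact absurd ((hv'mem x).mpr hx) hxv
            · have hyv : y ∈ R.1 := (hv'mem y).mpr hy
              rcases pstep_cases hst with rfl | hstb
              · exact absurd hyv hxv
              · by_cases hyv0 : y ∈ v
                · have hx1 : ReachLe (d + 1) a x := Or.inr ⟨y, (hmem y).mp hyv0, hst⟩
                  exact absurd ((hv'mem x).mpr hx1) hxv
                · have hy2 : y ∈ R.2 := by
                    rw [h1] at hyv
                    rcases List.mem_append.mp hyv with h | h
                    · exact absurd h hyv0
                    · exact h
                  exact Or.inr ⟨y, hy2, hstb⟩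
      have hrec := ih (d + 1) R.1 R.2 hinv'
      have e : d + 1 + k = d + (k + 1) := by omega
      rw [e] at hrec
      exact hrec

-- ---- assembly ----

theorem main_eq (t : Nat) (a : List Int) :
    quanpaiAux t a = PySem.List.sorted (pvLoop t [a] [a]) (fun x => x) false := by
  obtain ⟨hpwA, hmemA⟩ := quanpaiAux_spec t a
  have hinv : BfsInv a 0 [a] [a] := by
    refine ⟨List.nodup_singleton _, fun x => by simp [ReachLe], fun p hp => hp, ?_⟩
    intro x hx
    rcases hx with hx | ⟨y, hy, hst⟩
    · have hx' : x = a := hx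
      exact Or.inl (by simp [hx'])
    · have hy' : y = a := hy
      subst hy'
      rcases pstep_cases hst with rfl | hstb
      · exact Or.inl (List.mem_singleton_self _)
      · exact Or.inr ⟨y, List.mem_singleton_self _, hstb⟩
  obtain ⟨hndB, hmemB⟩ := pvLoop_spec a t 0 [a] [a] hinv
  have hndS : (PySem.List.sorted (pvLoop t [a] [a]) (fun x => x) false).Nodup :=
    (PySem.List.sorted_perm (pvLoop t [a] [a]) (fun x => x) false).nodup_iff.mpr hndB
  have hpwS : (PySem.List.sorted (pvLoop t [a] [a]) (fun x => x) false).Pairwise (· ≤ ·) := by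
    have h := PySem.List.sorted_pairwise (κ := List Int) (pvLoop t [a] [a]) (fun x => x)
    convert h using 2
  have hpwB : (PySem.List.sorted (pvLoop t [a] [a]) (fun x => x) false).Pairwise (· < ·) :=
    (hpwS.and hndS).imp (fun h => lt_of_le_of_ne h.1 h.2)
  refine strict_sorted_eq hpwA hpwB (fun x => ?_)
  rw [hmemA x, PySem.List.mem_sorted, hmemB x]
  simp

-- ===== VERDICT (by name: the statement is the Claim_ definition above) =====
theorem quanpai_spec : Claim_equal_quanpai := by
  intro a times _ hpre
  unfold Spec_quanpai quanpai quanpai_alt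
  by_cases h : times = 0
  · subst h; simpa using main_eq 0 a
  · by_cases h0 : times < 0
    · have ha : a = [] := by
        rcases hpre with hp | hp
        · omega
        · exact hp
      subst ha
      have ht : times.toNat = 0 := Int.toNat_of_nonpos (by omega)
      simp only [if_neg h, if_pos h0, List.length_nil, if_pos rfl, ht]
      simpa using main_eq 0 ([] : List Int)
    · simp only [if_neg h, if_neg h0]; exact main_eq times.toNat a
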